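-- pv_equiv track=rewrite | github.com/AdamZhouSE/pythonHomework | Code/CodeRecords/2359/60665/278968.py | triCount
-- ===== SOURCE A (Python) =====
-- def triCount(nums):
-- 	table = set(nums)
--
-- 	res = 0
-- 	for i in range(len(nums)):
-- 		for j in range(i+1,len(nums)):
-- 			if (nums[i] + nums[j]) in table:
-- 				res += 1
--
-- 	if res == 0:
-- 		return -1
-- 	else:
-- 		return res
-- ===== SOURCE B (Python) =====
-- def triCount(nums):
--     # One pass with a frequency map of already-seen values: for each element x,
--     # a pair (earlier y, x) counts iff y + x is one of the distinct values t,
--     # i.e. y == t - x; summing seen[t - x] over distinct t counts them all.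
--     table = set(nums)
--     seen = {}
--     res = 0
--     for x in nums:
--         for t in table:
--             res += seen.get(t - x, 0)
--         seen[x] = seen.get(x, 0) + 1
--     return -1 if res == 0 else res
-- ===== Notes on version B (the rewrite author's own statement) =====
-- stated objective: alternative
-- what changed: Replaces the nested index-pair scan with a single pass that maintains a frequency map of already-seen values and, for each element, counts earlier partners by looking up t-x for each distinct target value t.
import Mathlib
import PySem

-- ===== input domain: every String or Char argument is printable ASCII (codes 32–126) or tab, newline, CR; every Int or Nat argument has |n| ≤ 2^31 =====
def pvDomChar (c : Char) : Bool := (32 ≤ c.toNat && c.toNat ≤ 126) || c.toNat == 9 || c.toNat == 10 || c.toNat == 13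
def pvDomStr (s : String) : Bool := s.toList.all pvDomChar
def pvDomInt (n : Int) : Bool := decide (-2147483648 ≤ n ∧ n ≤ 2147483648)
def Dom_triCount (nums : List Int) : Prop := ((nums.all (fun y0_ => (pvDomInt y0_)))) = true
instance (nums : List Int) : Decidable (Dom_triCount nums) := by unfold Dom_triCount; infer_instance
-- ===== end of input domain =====

-- B replaces A's nested index-pair scan by one pass with a frequency map of seen values ("alternative").

-- ===== PORT A =====
def triCount (nums : List Int) : Int :=
  let table : PySem.Set Int := PySem.Set.ofList nums
  let res : Int :=
    (PySem.List.pyRange 0 (nums.length : Int) 1).foldl (fun res i =>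
      (PySem.List.pyRange (i + 1) (nums.length : Int) 1).foldl (fun res j =>
        if PySem.Set.contains table (PySem.List.pyGetD nums i 0 + PySem.List.pyGetD nums j 0)
        then res + 1 else res) res) 0
  if res = 0 then -1 else res

-- ===== PORT B =====
def triCount_alt (nums : List Int) : Int :=
  let table : PySem.Set Int := PySem.Set.ofList nums
  let st : Int × PySem.Dict Int Int :=
    nums.foldl (fun st x =>
      let res := table.foldl (fun res t => res + st.2.getD (t - x) 0) st.1
      (res, st.2.modify x 0 (· + 1))) (0, PySem.Dict.empty)
  if st.1 = 0 then -1 else st.1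

-- ===== PRECONDITION & SPEC =====
def Spec_triCount (nums : List Int) (out : Int) : Prop := out = triCount_alt nums
instance (nums : List Int) (out : Int) : Decidable (Spec_triCount nums out) := by unfold Spec_triCount; infer_instance

-- ===== CLAIM (what is proved, stated in full; the proofs are below) =====
def Claim_equal_triCount : Prop := ∀ (nums : List Int), Dom_triCount nums → Spec_triCount nums (triCount nums)

-- ===== LEMMAS AND PROOFS =====

-- total count of pairs (earlier, later) whose sum is in table, by recursion on the list
def pairCnt (table : List Int) : List Int → Int
  | [] => 0
  | x :: xs => (xs.countP (fun y => PySem.Set.contains table (x + y)) : Int) + pairCnt table xs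

theorem pairCnt_append_singleton (table l : List Int) (x : Int) :
    pairCnt table (l ++ [x]) =
      pairCnt table l + (l.countP (fun y => PySem.Set.contains table (y + x)) : Int) := by
  induction l with
  | nil => simp [pairCnt]
  | cons a l ih =>
    simp only [List.cons_append, pairCnt, ih, List.countP_append, List.countP_cons,
      List.countP_nil]
    push_cast
    have : a + x = x + a := by ring
    rw [this]
    split_ifs <;> ring

theorem sum_counts (table : List Int) (hnd : table.Nodup) (x : Int) (pre : List Int) :
    (table.map (fun t => ((pre.count (t - x) : Int)))).sum
      = (pre.countP (fun y => PySem.Set.contains table (y + x)) : Int) := by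
  induction pre with
  | nil => simp
  | cons v pre ih =>
    have hcnt : ∀ t : Int, ((v :: pre).count (t - x) : Int)
        = (pre.count (t - x) : Int) + (if t = v + x then 1 else 0) := by
      intro t
      rw [List.count_cons]
      have : (v == (t - x)) = decide (t = v + x) := by
        by_cases h : t = v + x
        · simp [h]
        · simp [h]; omega
      rw [this]
      by_cases h : t = v + x <;> simp [h]
    simp only [hcnt]
    rw [PySem.List.sum_map_add_int, ih, List.countP_cons]
    have h1 : (table.map (fun t => if t = v + x then (1 : Int) else 0)).sum
        = (table.count (v + x) : Int) := by
      have he : (fun t : Int => if t = v + x then (1 : Int) else 0)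
          = (fun t : Int => if (t == v + x) = true then (1 : Int) else 0) := by
        funext t; by_cases h : t = v + x <;> simp [h]
      rw [he, PySem.List.sum_map_ite_one_zero]
      norm_cast
    have h2 : (table.count (v + x) : Int)
        = (if PySem.Set.contains table (v + x) then (1 : Int) else 0) := by
      by_cases h : (v + x) ∈ table
      · simp [List.count_eq_one_of_mem hnd h, h]
      · simp [List.count_eq_zero_of_not_mem h, h]
    rw [h1, h2]
    split_ifs <;> push_cast <;> ring

theorem a_outer (nums : List Int) (table : PySem.Set Int) :
    ∀ (m k : Nat) (r : Int), nums.length - k ≤ m → k ≤ nums.length →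
    (PySem.List.pyRange (k : Int) (nums.length : Int) 1).foldl (fun res i =>
      (PySem.List.pyRange (i + 1) (nums.length : Int) 1).foldl (fun res j =>
        if PySem.Set.contains table (PySem.List.pyGetD nums i 0 + PySem.List.pyGetD nums j 0)
        then res + 1 else res) res) r
    = r + pairCnt table (nums.drop k) := by
  intro m
  induction m with
  | zero =>
    intro k r hm hk
    have hk' : k = nums.length := by omega
    subst hk'
    rw [PySem.List.pyRange_one_eq_nil (le_refl _), List.drop_length]
    simp [pairCnt]
  | succ m ih =>
    intro k r hm hk
    by_cases hlt : k < nums.length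
    · have hcast : ((k : Int)) < (nums.length : Int) := by exact_mod_cast hlt
      rw [PySem.List.pyRange_one_cons hcast, List.foldl_cons]
      have hstep : ((k : Int) + 1) = (((k + 1 : Nat)) : Int) := by push_cast; ring
      rw [hstep]
      have hinner :
          (PySem.List.pyRange ((k + 1 : Nat) : Int) (nums.length : Int) 1).foldl (fun res j =>
            if PySem.Set.contains table (PySem.List.pyGetD nums (k : Int) 0 + PySem.List.pyGetD nums j 0)
            then res + 1 else res) r
          = r + ((nums.drop (k + 1)).countP
              (fun y => PySem.Set.contains table (PySem.List.pyGetD nums (k : Int) 0 + y)) : Int) := by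
        rw [PySem.List.foldl_pyRange_pyGetD' nums 0
          (fun acc y => if PySem.Set.contains table (PySem.List.pyGetD nums (k : Int) 0 + y)
            then acc + 1 else acc) r (by positivity)]
        rw [Int.toNat_natCast]
        exact PySem.List.foldl_if_add_one _ _ r
      rw [hinner, ih (k + 1) _ (by omega) (by omega)]
      have hget : PySem.List.pyGetD nums (k : Int) 0 = nums[k] := by
        rw [PySem.List.pyGetD_natCast, List.getD_eq_getElem?_getD, List.getElem?_eq_getElem hlt]
        rfl
      rw [List.drop_eq_getElem_cons hlt]
      simp only [pairCnt, hget]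
      ring
    · have hk' : k = nums.length := by omega
      subst hk'
      rw [PySem.List.pyRange_one_eq_nil (le_refl _), List.drop_length]
      simp [pairCnt]

theorem a_eq_paircnt (nums : List Int) :
    (PySem.List.pyRange 0 (nums.length : Int) 1).foldl (fun res i =>
      (PySem.List.pyRange (i + 1) (nums.length : Int) 1).foldl (fun res j =>
        if PySem.Set.contains (PySem.Set.ofList nums) (PySem.List.pyGetD nums i 0 + PySem.List.pyGetD nums j 0)
        then res + 1 else res) res) 0 = pairCnt (PySem.Set.ofList nums) nums := by
  have h := a_outer nums (PySem.Set.ofList nums) nums.length 0 0 (by omega) (by omega)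
  simpa using h

theorem b_fold (table : List Int) (hnd : table.Nodup) (l : List Int) :
    l.foldl (fun st x =>
      (table.foldl (fun res t => res + st.2.getD (t - x) 0) st.1, st.2.modify x 0 (· + 1)))
      ((0 : Int), (PySem.Dict.empty : PySem.Dict Int Int))
    = (pairCnt table l, PySem.Dict.counter l) := by
  induction l using List.reverseRecOn with
  | nil => simp [pairCnt, PySem.Dict.counter_eq_foldl]
  | append_singleton l x ih =>
    rw [List.foldl_append, ih, List.foldl_cons, List.foldl_nil]
    refine Prod.ext ?_ ?_
    · show table.foldl (fun res t => res + (PySem.Dict.counter l).getD (t - x) 0) (pairCnt table l)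
        = pairCnt table (l ++ [x])
      rw [PySem.List.foldl_add]
      have hg : (table.map (fun t => (PySem.Dict.counter l).getD (t - x) 0))
          = table.map (fun t => ((l.count (t - x) : Int))) := by
        apply List.map_congr_left
        intro t _
        exact PySem.Dict.getD_counter l (t - x)
      rw [hg, sum_counts table hnd x l, pairCnt_append_singleton]
    · show (PySem.Dict.counter l).modify x 0 (· + 1) = PySem.Dict.counter (l ++ [x])
      rw [PySem.Dict.counter_eq_foldl, PySem.Dict.counter_eq_foldl, List.foldl_append,
        List.foldl_cons, List.foldl_nil]

theorem b_fold_eq (nums : List Int) :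
    nums.foldl (fun st x =>
      let res := (PySem.Set.ofList nums).foldl (fun res t => res + st.2.getD (t - x) 0) st.1
      (res, st.2.modify x 0 (· + 1))) ((0 : Int), (PySem.Dict.empty : PySem.Dict Int Int))
    = (pairCnt (PySem.Set.ofList nums) nums, PySem.Dict.counter nums) := by
  exact b_fold (PySem.Set.ofList nums) (PySem.Set.nodup_ofList nums) nums


-- ===== VERDICT (by name: the statement is the Claim_ definition above) =====
theorem triCount_spec : Claim_equal_triCount := by
  intro nums _
  unfold Spec_triCount triCount triCount_alt
  simp only [a_eq_paircnt, b_fold_eq]
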